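-- pv_equiv track=rewrite | github.com/loew-tech/advent_of_code_2023 | utils.py | roll_boulders
-- ===== SOURCE A (Python) =====
-- from typing import Tuple, Callable, Any, Generator, DefaultDict, Set, Iterable, \
--     List, Dict
--
-- def roll_boulders(grid: List[str]) -> List[List[str]]:
--     copy_ = [[x for x in row] for row in grid]
--     for x in range(len(grid[0])):
--         last_boulder = -1
--         for y in range(len(grid)):
--             if grid[y][x] == '#':
--                 last_boulder = y
--             elif grid[y][x] == 'O':
--                 copy_[y][x], copy_[last_boulder + 1][x] = '.', 'O'
--                 last_boulder += 1
--     return copy_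
-- ===== SOURCE B (Python) =====
-- def _roll_segment(seg):
--     k = seg.count('O')
--     return ['O'] * k + ['.' if c == 'O' else c for c in seg[k:]]
--
--
-- def _roll_column(col):
--     if '#' in col:
--         i = col.index('#')
--         return _roll_segment(col[:i]) + ['#'] + _roll_column(col[i + 1:])
--     return _roll_segment(col)
--
--
-- def roll_boulders(grid):
--     res = [list(row) for row in grid]
--     for x in range(len(grid[0])):
--         new_col = _roll_column([row[x] for row in grid])
--         for y, c in enumerate(new_col):
--             res[y][x] = c
--     return res
-- ===== Notes on version B (the rewrite author's own statement) =====
-- stated objective: alternative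
-- what changed: B rolls each column independently by splitting it into '#'-delimited segments and rebuilding each segment as k 'O's followed by the remaining cells with 'O' replaced by '.', instead of A's in-place mutation driven by a running last_boulder pointer over the whole 2D copy.
import Mathlib
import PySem

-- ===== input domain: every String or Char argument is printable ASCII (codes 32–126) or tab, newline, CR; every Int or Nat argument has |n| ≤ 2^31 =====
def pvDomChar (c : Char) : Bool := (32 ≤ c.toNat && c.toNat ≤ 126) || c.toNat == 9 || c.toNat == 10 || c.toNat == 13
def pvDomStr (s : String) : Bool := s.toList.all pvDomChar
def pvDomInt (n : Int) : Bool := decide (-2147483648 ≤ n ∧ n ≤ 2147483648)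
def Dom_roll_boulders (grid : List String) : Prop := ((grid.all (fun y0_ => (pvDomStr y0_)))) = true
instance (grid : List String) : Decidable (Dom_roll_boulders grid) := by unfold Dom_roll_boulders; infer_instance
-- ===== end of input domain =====

-- B rolls each column as wall-delimited segments (count the 'O's, refill from the top) instead of
-- A's running last_boulder pointer; an alternative decomposition, same asymptotic cost.

-- ===== PORT A =====
-- [x for x in row]: the row split into one-character strings
def pvCells (row : String) : List String := row.toList.map (fun c => String.singleton c)

-- m[y][x] = v  (out-of-range set is a no-op; under Pre_ every write is in range)
def pvSetCell (m : List (List String)) (y x : Nat) (v : String) : List (List String) :=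
  m.set y ((m.getD y []).set x v)

-- grid[y][x] as a Char (' ' default is never used under Pre_)
def pvCharAt (grid : List String) (y x : Nat) : Char :=
  (PySem.Str.pyGet? (grid.getD y "") (x : Int)).getD ' '

-- body of A's inner `for y in range(len(grid))` loop: state (copy_, last_boulder);
-- last_boulder ≥ -1 always, so (st.2 + 1).toNat is exact (no negative index is reachable)
def pvInnerStep (grid : List String) (x : Nat) (st : List (List String) × Int) (y : Nat) :
    List (List String) × Int :=
  let c := pvCharAt grid y x
  if c = '#' then (st.1, (y : Int))
  else if c = 'O' then
    (pvSetCell (pvSetCell st.1 y x ".") (st.2 + 1).toNat x "O", st.2 + 1)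
  else st

def roll_boulders (grid : List String) : List (List String) :=
  (List.range ((grid.headD "").toList.length)).foldl
    (fun m x => ((List.range grid.length).foldl (pvInnerStep grid x) (m, -1)).1)
    (grid.map pvCells)

-- ===== PORT B =====
-- _roll_segment: k 'O's first, then the rest with each 'O' turned into '.'
def pvRollSegment (seg : List Char) : List Char :=
  List.replicate (seg.count 'O') 'O' ++
    (seg.drop (seg.count 'O')).map (fun c => if c = 'O' then '.' else c)

-- _roll_column: split at the first '#', roll the segment, recurse on the rest
def pvRollColumn (col : List Char) : List Char :=
  match h : PySem.List.index? col '#' with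
  | none => pvRollSegment col
  | some i => pvRollSegment (col.take i) ++ '#' :: pvRollColumn (col.drop (i + 1))
termination_by col.length
decreasing_by
  obtain ⟨hk, -⟩ := PySem.List.getElem_of_index?_eq_some h
  simp only [List.length_drop]; omega

-- [row[x] for row in grid]
def pvCol (grid : List String) (x : Nat) : List Char :=
  grid.map (fun row => (PySem.Str.pyGet? row (x : Int)).getD ' ')

def roll_boulders_alt (grid : List String) : List (List String) :=
  (List.range ((grid.headD "").toList.length)).foldl
    (fun res x =>
      (PySem.List.enumerate (pvRollColumn (pvCol grid x)) 0).foldl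
        (fun r p => pvSetCell r p.1.toNat x (String.singleton p.2)) res)
    (grid.map pvCells)

-- ===== PRECONDITION & SPEC =====
-- Pre_: the grid is nonempty and no row is shorter than row 0 — exactly where A's
-- grid[0] / grid[y][x] do not raise IndexError.
def Pre_roll_boulders (grid : List String) : Prop :=
  grid ≠ [] ∧ ∀ row ∈ grid, (grid.headD "").toList.length ≤ row.toList.length
instance (grid : List String) : Decidable (Pre_roll_boulders grid) := by
  unfold Pre_roll_boulders; infer_instance

def pvWitness_roll_boulders : List String := ["O#.", ".OO", "O.#"]

def Spec_roll_boulders (grid : List String) (out : List (List String)) : Prop :=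
  out = roll_boulders_alt grid
instance (grid : List String) (out : List (List String)) : Decidable (Spec_roll_boulders grid out) := by
  unfold Spec_roll_boulders; infer_instance

-- ===== CLAIM (what is proved, stated in full; the proofs are below) =====
def Claim_equal_roll_boulders : Prop := ∀ (grid : List String), Dom_roll_boulders grid →
  Pre_roll_boulders grid → Spec_roll_boulders grid (roll_boulders grid)

-- ===== LEMMAS AND PROOFS =====
-- cell read (proof-only helper)
def pvGetCell (m : List (List String)) (i j : Nat) : String := (m.getD i []).getD j ""

theorem pv_len_setCell (m : List (List String)) (y x : Nat) (v : String) :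
    (pvSetCell m y x v).length = m.length := by simp [pvSetCell]
theorem pv_rowlen_setCell (m : List (List String)) (y x : Nat) (v : String) (i : Nat) :
    ((pvSetCell m y x v).getD i []).length = (m.getD i []).length := by
  simp only [pvSetCell, List.getD_eq_getElem?_getD, List.getElem?_set]
  split_ifs with h1 h2 <;> simp_all

theorem pv_getCell_setCell_ne (m : List (List String)) (y x : Nat) (v : String) (i j : Nat)
    (hj : j ≠ x) : pvGetCell (pvSetCell m y x v) i j = pvGetCell m i j := by
  simp only [pvGetCell, pvSetCell, List.getD_eq_getElem?_getD, List.getElem?_set]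
  split_ifs with h1 h2 <;> simp_all [List.getD_eq_getElem?_getD, Ne.symm hj]

theorem pv_getCell_setCell (m : List (List String)) (y x : Nat) (v : String) (i j : Nat)
    (hy : y < m.length) (hx : x < (m.getD y []).length) :
    pvGetCell (pvSetCell m y x v) i j = if i = y ∧ j = x then v else pvGetCell m i j := by
  simp only [pvGetCell, pvSetCell, List.getD_eq_getElem?_getD, List.getElem?_set]
  by_cases hiy : i = y
  · subst hiy
    simp only [if_pos rfl, if_pos hy, Option.getD_some]
    by_cases hjx : j = x
    · subst hjx
      rw [List.getD_eq_getElem?_getD] at hx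
      simp [hx]
    · simp [List.getD_eq_getElem?_getD, List.getElem?_set, hjx, Ne.symm hjx]
  · simp [Ne.symm hiy, hiy]

theorem pv_matExt (m m' : List (List String)) (hl : m.length = m'.length)
    (hr : ∀ i, (m.getD i []).length = (m'.getD i []).length)
    (he : ∀ i j, pvGetCell m i j = pvGetCell m' i j) : m = m' := by
  apply List.ext_getElem hl
  intro i h1 h2
  apply List.ext_getElem
  · have := hr i; simpa [List.getD_eq_getElem?_getD, List.getElem?_eq_getElem, h1, h2] using this
  · intro j hj1 hj2
    have := he i j
    simpa [pvGetCell, List.getD_eq_getElem?_getD, List.getElem?_eq_getElem, h1, h2,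
      hj1, hj2] using this

-- fill pointer of A's loop after a column prefix (= last_boulder + 1)
def pvFill (col : List Char) : Nat :=
  match h : PySem.List.index? col '#' with
  | none => col.count 'O'
  | some i => i + 1 + pvFill (col.drop (i + 1))
termination_by col.length
decreasing_by
  obtain ⟨hk, -⟩ := PySem.List.getElem_of_index?_eq_some h
  simp only [List.length_drop]; omega

theorem pv_rollColumn_none (col : List Char) (h : PySem.List.index? col '#' = none) :
    pvRollColumn col = pvRollSegment col := by
  rw [pvRollColumn]; split <;> simp_all [← PySem.List.index?_eq_idxOf?]

theorem pv_rollColumn_some (col : List Char) (i : Nat) (h : PySem.List.index? col '#' = some i) :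
    pvRollColumn col = pvRollSegment (col.take i) ++ '#' :: pvRollColumn (col.drop (i + 1)) := by
  rw [pvRollColumn]; split <;> simp_all [← PySem.List.index?_eq_idxOf?]

theorem pv_fill_none (col : List Char) (h : PySem.List.index? col '#' = none) :
    pvFill col = col.count 'O' := by
  rw [pvFill]; split <;> simp_all [← PySem.List.index?_eq_idxOf?]

theorem pv_fill_some (col : List Char) (i : Nat) (h : PySem.List.index? col '#' = some i) :
    pvFill col = i + 1 + pvFill (col.drop (i + 1)) := by
  rw [pvFill]; split <;> simp_all [← PySem.List.index?_eq_idxOf?]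

theorem pv_rollSegment_length (seg : List Char) : (pvRollSegment seg).length = seg.length := by
  have := List.count_le_length (a := 'O') (l := seg)
  simp [pvRollSegment]; omega

theorem pv_rollColumn_length (col : List Char) : (pvRollColumn col).length = col.length := by
  fun_induction pvRollColumn col with
  | case1 col h => exact pv_rollSegment_length col
  | case2 col i h ih =>
    obtain ⟨hk, -⟩ := PySem.List.getElem_of_index?_eq_some h
    simp [pv_rollSegment_length, ih]
    omega

theorem pv_fill_le (col : List Char) : pvFill col ≤ col.length := by
  fun_induction pvFill col with
  | case1 col h => exact List.count_le_length
  | case2 col i h ih =>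
    obtain ⟨hk, -⟩ := PySem.List.getElem_of_index?_eq_some h
    simp only [List.length_drop] at ih ⊢
    omega
theorem pv_seg_app_other (l : List Char) (c : Char) (hc : c ≠ 'O') :
    pvRollSegment (l ++ [c]) = pvRollSegment l ++ [c] := by
  have hcnt : (l ++ [c]).count 'O' = l.count 'O' := by
    simp [List.count_append, List.count_singleton, hc]
  have hk : l.count 'O' ≤ l.length := List.count_le_length
  simp only [pvRollSegment, hcnt, List.drop_append_of_le_length hk, List.map_append]
  simp [hc]

theorem pv_seg_app_O (l : List Char) :
    pvRollSegment (l ++ ['O']) = (pvRollSegment l ++ ['.']).set (l.count 'O') 'O' := by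
  have hcnt : (l ++ ['O']).count 'O' = l.count 'O' + 1 := by
    simp [List.count_append]
  have hk : l.count 'O' ≤ l.length := List.count_le_length
  rcases Nat.lt_or_ge (l.count 'O') l.length with hlt | hge
  · obtain ⟨d, rest, hdr⟩ : ∃ d rest, l.drop (l.count 'O') = d :: rest := by
      cases h : l.drop (l.count 'O') with
      | nil => exfalso; have := List.length_drop (l := l) (i := l.count 'O'); simp [h] at this; omega
      | cons d rest => exact ⟨d, rest, rfl⟩
    have hdrop1 : l.drop (l.count 'O' + 1) = rest := by
      have : l.drop (l.count 'O' + 1) = (l.drop (l.count 'O')).drop 1 := by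
        rw [List.drop_drop]
      rw [this, hdr]; rfl
    have hreplen : (List.replicate (l.count 'O') 'O').length = l.count 'O' := List.length_replicate
    simp only [pvRollSegment, hcnt, List.drop_append_of_le_length (by omega : l.count 'O' + 1 ≤ l.length),
      hdrop1, hdr, List.map_append, List.map_cons]
    rw [List.set_append]
    simp [List.replicate_succ', List.append_assoc]
  · have heq : l.count 'O' = l.length := le_antisymm hk hge
    have hdrop : l.drop (l.count 'O') = [] := by simp [heq]
    have hdrop2 : (l ++ ['O']).drop (l.count 'O' + 1) = [] := by
      rw [heq]
      have : l.length + 1 = (l ++ ['O']).length := by simp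
      rw [this, List.drop_length]
    simp only [pvRollSegment, hcnt, hdrop, hdrop2, List.map_nil, List.append_nil]
    rw [List.set_append]
    simp [heq, List.replicate_succ']
theorem pv_rollColumn_nil : pvRollColumn [] = [] := by
  rw [pv_rollColumn_none [] (by simp [PySem.List.index?_eq_idxOf?])]
  simp [pvRollSegment]

theorem pv_fill_nil : pvFill [] = 0 := by
  rw [pv_fill_none [] (by simp [PySem.List.index?_eq_idxOf?])]
  simp

theorem pv_idx_app_of_some (l : List Char) (t : List Char) (i : Nat)
    (h : PySem.List.index? l '#' = some i) : PySem.List.index? (l ++ t) '#' = some i := by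
  rw [PySem.List.index?_append_of_mem t ((PySem.List.index?_isSome_iff l '#').mp (by rw [h]; rfl))]
  exact h

theorem pv_roll_app_wall (l : List Char) : pvRollColumn (l ++ ['#']) = pvRollColumn l ++ ['#'] := by
  fun_induction pvRollColumn l with
  | case1 l h =>
    have hnm : '#' ∉ l := (PySem.List.index?_eq_none_iff l '#').mp h
    rw [pv_rollColumn_some (l ++ ['#']) l.length (PySem.List.index?_append_singleton_self l '#' hnm)]
    rw [List.take_left, show (l ++ ['#']).drop (l.length + 1) = [] by
      simp [List.drop_append_of_le_length]]
    simp [pv_rollColumn_nil]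
  | case2 l i h ih =>
    obtain ⟨hk, -⟩ := PySem.List.getElem_of_index?_eq_some h
    rw [pv_rollColumn_some (l ++ ['#']) i (pv_idx_app_of_some l _ i h)]
    rw [List.take_append_of_le_length (by omega), List.drop_append_of_le_length (by omega), ih]
    simp

theorem pv_roll_app_other (l : List Char) (c : Char) (hcw : c ≠ '#') (hco : c ≠ 'O') :
    pvRollColumn (l ++ [c]) = pvRollColumn l ++ [c] := by
  fun_induction pvRollColumn l with
  | case1 l h =>
    have hnm : '#' ∉ l := (PySem.List.index?_eq_none_iff l '#').mp h
    have hnone : PySem.List.index? (l ++ [c]) '#' = none := by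
      rw [PySem.List.index?_eq_none_iff _ _]; simp [hnm, Ne.symm hcw, hcw]
    rw [pv_rollColumn_none _ hnone, pv_seg_app_other l c hco]
  | case2 l i h ih =>
    obtain ⟨hk, -⟩ := PySem.List.getElem_of_index?_eq_some h
    rw [pv_rollColumn_some (l ++ [c]) i (pv_idx_app_of_some l _ i h)]
    rw [List.take_append_of_le_length (by omega), List.drop_append_of_le_length (by omega), ih]
    simp

theorem pv_roll_app_O (l : List Char) :
    pvRollColumn (l ++ ['O']) = (pvRollColumn l ++ ['.']).set (pvFill l) 'O' := by
  fun_induction pvRollColumn l with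
  | case1 l h =>
    have hnm : '#' ∉ l := (PySem.List.index?_eq_none_iff l '#').mp h
    have hnone : PySem.List.index? (l ++ ['O']) '#' = none := by
      rw [PySem.List.index?_eq_none_iff _ _]; simp [hnm]
    rw [pv_rollColumn_none _ hnone, pv_seg_app_O l, pv_fill_none l h]
  | case2 l i h ih =>
    obtain ⟨hk, -⟩ := PySem.List.getElem_of_index?_eq_some h
    rw [pv_rollColumn_some (l ++ ['O']) i (pv_idx_app_of_some l _ i h)]
    rw [List.take_append_of_le_length (by omega), List.drop_append_of_le_length (by omega), ih]
    rw [pv_fill_some l i h]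
    have hseglen : (pvRollSegment (l.take i)).length = i := by
      rw [pv_rollSegment_length]; simp; omega
    conv_rhs => rw [show pvRollSegment (l.take i) ++ '#' :: pvRollColumn (l.drop (i + 1)) ++ ['.']
        = pvRollSegment (l.take i) ++ ('#' :: (pvRollColumn (l.drop (i + 1)) ++ ['.'])) by simp,
      List.set_append, hseglen, if_neg (by omega : ¬ (i + 1 + pvFill (l.drop (i + 1)) < i)),
      show i + 1 + pvFill (l.drop (i + 1)) - i = pvFill (l.drop (i + 1)) + 1 by omega]
    simp

theorem pv_fill_app_wall (l : List Char) : pvFill (l ++ ['#']) = l.length + 1 := by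
  fun_induction pvFill l with
  | case1 l h =>
    have hnm : '#' ∉ l := (PySem.List.index?_eq_none_iff l '#').mp h
    rw [pv_fill_some (l ++ ['#']) l.length (PySem.List.index?_append_singleton_self l '#' hnm)]
    rw [show (l ++ ['#']).drop (l.length + 1) = [] by simp [List.drop_append_of_le_length]]
    simp [pv_fill_nil]
  | case2 l i h ih =>
    obtain ⟨hk, -⟩ := PySem.List.getElem_of_index?_eq_some h
    rw [pv_fill_some (l ++ ['#']) i (pv_idx_app_of_some l _ i h)]
    rw [List.drop_append_of_le_length (by omega), ih]
    simp; omega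

theorem pv_fill_app_O (l : List Char) : pvFill (l ++ ['O']) = pvFill l + 1 := by
  fun_induction pvFill l with
  | case1 l h =>
    have hnm : '#' ∉ l := (PySem.List.index?_eq_none_iff l '#').mp h
    have hnone : PySem.List.index? (l ++ ['O']) '#' = none := by
      rw [PySem.List.index?_eq_none_iff _ _]; simp [hnm]
    rw [pv_fill_none _ hnone]
    simp [List.count_append]
  | case2 l i h ih =>
    obtain ⟨hk, -⟩ := PySem.List.getElem_of_index?_eq_some h
    rw [pv_fill_some (l ++ ['O']) i (pv_idx_app_of_some l _ i h)]
    rw [List.drop_append_of_le_length (by omega), ih]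
    omega

theorem pv_fill_app_other (l : List Char) (c : Char) (hcw : c ≠ '#') (hco : c ≠ 'O') :
    pvFill (l ++ [c]) = pvFill l := by
  fun_induction pvFill l with
  | case1 l h =>
    have hnm : '#' ∉ l := (PySem.List.index?_eq_none_iff l '#').mp h
    have hnone : PySem.List.index? (l ++ [c]) '#' = none := by
      rw [PySem.List.index?_eq_none_iff _ _]; simp [hnm, Ne.symm hcw, hcw]
    rw [pv_fill_none _ hnone]
    simp [List.count_append, List.count_singleton, hco]
  | case2 l i h ih =>
    obtain ⟨hk, -⟩ := PySem.List.getElem_of_index?_eq_some h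
    rw [pv_fill_some (l ++ [c]) i (pv_idx_app_of_some l _ i h)]
    rw [List.drop_append_of_le_length (by omega), ih]

-- B's inner write loop (proof-only name for the fold in roll_boulders_alt)
def pvWr (x : Nat) (m : List (List String)) (l : List (Int × Char)) : List (List String) :=
  l.foldl (fun r p => pvSetCell r p.1.toNat x (String.singleton p.2)) m

theorem pv_wr_len (x : Nat) (l : List (Int × Char)) (m : List (List String)) :
    (pvWr x m l).length = m.length := by
  induction l generalizing m with
  | nil => rfl
  | cons p l ih => simp [pvWr, List.foldl_cons] at ih ⊢; rw [ih, pv_len_setCell]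

theorem pv_wr_rowlen (x : Nat) (l : List (Int × Char)) (m : List (List String)) (i : Nat) :
    ((pvWr x m l).getD i []).length = (m.getD i []).length := by
  induction l generalizing m with
  | nil => rfl
  | cons p l ih => simp only [pvWr, List.foldl_cons] at ih ⊢; rw [ih, pv_rowlen_setCell]

theorem pv_wr_ne (x : Nat) (l : List (Int × Char)) (m : List (List String)) (i j : Nat)
    (hj : j ≠ x) : pvGetCell (pvWr x m l) i j = pvGetCell m i j := by
  induction l generalizing m with
  | nil => rfl
  | cons p l ih => simp only [pvWr, List.foldl_cons] at ih ⊢; rw [ih, pv_getCell_setCell_ne _ _ _ _ _ _ hj]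

theorem pv_wr_enum (x : Nat) (vals : List Char) : ∀ (s : Nat) (m : List (List String)),
    s + vals.length ≤ m.length → (∀ i, i < m.length → x < (m.getD i []).length) → ∀ i j,
    pvGetCell (pvWr x m (PySem.List.enumerate vals (s : Int))) i j =
      if j = x ∧ s ≤ i ∧ i < s + vals.length then String.singleton (vals.getD (i - s) ' ')
      else pvGetCell m i j := by
  induction vals with
  | nil =>
    intro s m hs hr i j
    simp only [PySem.List.enumerate_nil, pvWr, List.foldl_nil]
    rw [if_neg (by rintro ⟨-, h1, h2⟩; simp at h2; omega)]
  | cons v vs ih =>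
    intro s m hs hr i j
    rw [PySem.List.enumerate_cons]
    simp only [pvWr, List.foldl_cons]
    have hcast : ((s : Int) + 1) = ((s + 1 : Nat) : Int) := by push_cast; ring
    have hlen : (pvSetCell m ((s : Int)).toNat x (String.singleton v)).length = m.length :=
      pv_len_setCell _ _ _ _
    have hrow' : ∀ i, i < (pvSetCell m ((s : Int)).toNat x (String.singleton v)).length →
        x < ((pvSetCell m ((s : Int)).toNat x (String.singleton v)).getD i []).length := by
      intro i hi; rw [pv_rowlen_setCell]; rw [hlen] at hi; exact hr i hi
    have := ih (s + 1) (pvSetCell m ((s : Int)).toNat x (String.singleton v))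
      (by rw [hlen]; simp at hs; omega) hrow' i j
    rw [hcast]
    simp only [pvWr] at this
    rw [this]
    have hsn : ((s : Int)).toNat = s := by omega
    rw [hsn] at *
    have hset := pv_getCell_setCell m s x (String.singleton v) i j
      (by simp at hs; omega) (hr s (by simp at hs; omega))
    by_cases hjx : j = x
    · subst hjx
      by_cases his : i = s
      · subst his
        rw [if_neg (by omega), hset, if_pos ⟨rfl, rfl⟩, if_pos (by refine ⟨rfl, Nat.le_refl _, ?_⟩; simp)]
        simp
      · by_cases hgt : s + 1 ≤ i ∧ i < s + 1 + vs.length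
        · rw [if_pos ⟨rfl, hgt.1, hgt.2⟩, if_pos (by refine ⟨rfl, by omega, ?_⟩; simp; omega)]
          congr 1
          rw [show i - s = (i - (s + 1)) + 1 by omega]
          simp
        · rw [if_neg (by rintro ⟨-, h1, h2⟩; exact hgt ⟨h1, h2⟩), hset,
            if_neg (by intro h; exact his h.1),
            if_neg (by rintro ⟨-, h1, h2⟩; simp at h2; exact hgt ⟨by omega, by omega⟩)]
    · rw [if_neg (by intro h; exact hjx h.1), hset, if_neg (by intro h; exact hjx h.2),
        if_neg (by intro h; exact hjx h.1)]

theorem pv_charAt_col (grid : List String) (x y : Nat) (hy : y < grid.length) :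
    pvCharAt grid y x = (pvCol grid x).getD y ' ' := by
  simp [pvCharAt, pvCol, List.getD_eq_getElem?_getD, List.getElem?_map,
    List.getElem?_eq_getElem, hy]

theorem pv_take_succ_getD (l : List Char) (n : Nat) (hn : n < l.length) :
    l.take (n + 1) = l.take n ++ [l.getD n ' '] := by
  rw [List.take_succ]
  simp [List.getElem?_eq_getElem, hn, List.getD_eq_getElem?_getD]

theorem pv_getD_append (l l' : List Char) (n : Nat) (h : n < l.length) :
    (l ++ l').getD n ' ' = l.getD n ' ' := by
  simp [List.getD_eq_getElem?_getD, List.getElem?_append_left h]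

theorem pv_getD_append_at (l : List Char) (c : Char) (k : Nat) (h : k = l.length) :
    (l ++ [c]).getD k ' ' = c := by
  subst h; simp [List.getD_eq_getElem?_getD]

theorem pv_getD_set_ne (l : List Char) (f i : Nat) (v : Char) (h : i ≠ f) :
    (l.set f v).getD i ' ' = l.getD i ' ' := by
  simp [List.getD_eq_getElem?_getD, List.getElem?_set, Ne.symm h, h]

theorem pv_getD_set_self (l : List Char) (f : Nat) (v : Char) (h : f < l.length) :
    (l.set f v).getD f ' ' = v := by
  simp [List.getD_eq_getElem?_getD, List.getElem?_set, h]

theorem pv_inner (grid : List String) (x : Nat) (m : List (List String))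
    (hm : m.length = grid.length)
    (hrow : ∀ i, i < m.length → x < (m.getD i []).length)
    (hcol : ∀ i, i < grid.length →
      pvGetCell m i x = String.singleton ((pvCol grid x).getD i ' ')) :
    ∀ n, n ≤ grid.length →
    ((List.range n).foldl (pvInnerStep grid x) (m, -1)).2
        = (pvFill ((pvCol grid x).take n) : Int) - 1
    ∧ ((List.range n).foldl (pvInnerStep grid x) (m, -1)).1.length = m.length
    ∧ (∀ i, (((List.range n).foldl (pvInnerStep grid x) (m, -1)).1.getD i []).length
        = (m.getD i []).length)
    ∧ ∀ i j, pvGetCell ((List.range n).foldl (pvInnerStep grid x) (m, -1)).1 i j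
        = if j = x ∧ i < n
          then String.singleton ((pvRollColumn ((pvCol grid x).take n)).getD i ' ')
          else pvGetCell m i j := by
  intro n
  induction n with
  | zero =>
    intro _
    refine ⟨by simp [pv_fill_nil], rfl, fun i => rfl, fun i j => by simp⟩
  | succ n ih =>
    intro hn
    have hn' : n ≤ grid.length := by omega
    obtain ⟨ih1, ih2, ih3, ih4⟩ := ih hn'
    have hnl : n < (pvCol grid x).length := by simp [pvCol]; omega
    have htake : (pvCol grid x).take (n + 1)
        = (pvCol grid x).take n ++ [(pvCol grid x).getD n ' '] := pv_take_succ_getD _ n hnl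
    have hstep : (List.range (n + 1)).foldl (pvInnerStep grid x) (m, -1)
        = pvInnerStep grid x ((List.range n).foldl (pvInnerStep grid x) (m, -1)) n := by
      rw [List.range_succ, List.foldl_append, List.foldl_cons, List.foldl_nil]
    have hc : pvCharAt grid n x = (pvCol grid x).getD n ' ' := pv_charAt_col grid x n (by omega)
    have hlen_take : ((pvCol grid x).take n).length = n := by simp; omega
    have hroll_len : (pvRollColumn ((pvCol grid x).take n)).length = n := by
      rw [pv_rollColumn_length, hlen_take]
    have hfill_le : pvFill ((pvCol grid x).take n) ≤ n := by
      have := pv_fill_le ((pvCol grid x).take n); omega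
    rw [hstep]
    simp only [pvInnerStep, hc]
    by_cases hw : (pvCol grid x).getD n ' ' = '#'
    · rw [if_pos hw]
      refine ⟨?_, ih2, ih3, ?_⟩
      · simp only [htake, hw, pv_fill_app_wall, hlen_take]
        push_cast; ring
      · intro i j
        rw [htake, hw, pv_roll_app_wall]
        by_cases hjx : j = x
        · subst hjx
          rcases Nat.lt_trichotomy i n with hi | hi | hi
          · rw [if_pos ⟨rfl, by omega⟩, pv_getD_append _ _ i (by omega)]
            have := ih4 i j
            rw [if_pos ⟨rfl, hi⟩] at this
            exact this
          · rw [if_pos ⟨rfl, by omega⟩, pv_getD_append_at _ _ _ (by omega)]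
            have := ih4 i j
            rw [if_neg (by omega)] at this
            rw [this, hcol i (by omega), hi, hw]
          · rw [if_neg (by omega)]
            have := ih4 i j
            rw [if_neg (by omega)] at this
            exact this
        · rw [if_neg (by intro h; exact hjx h.1)]
          have := ih4 i j
          rw [if_neg (by intro h; exact hjx h.1)] at this
          exact this
    · rw [if_neg hw]
      by_cases ho : (pvCol grid x).getD n ' ' = 'O'
      · rw [if_pos ho]
        have hM : ((List.range n).foldl (pvInnerStep grid x) (m, -1)).1.length = m.length := ih2
        have hlb : ((List.range n).foldl (pvInnerStep grid x) (m, -1)).2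
            = (pvFill ((pvCol grid x).take n) : Int) - 1 := ih1
        have htn : (((List.range n).foldl (pvInnerStep grid x) (m, -1)).2 + 1).toNat
            = pvFill ((pvCol grid x).take n) := by rw [hlb]; omega
        refine ⟨?_, ?_, ?_, ?_⟩
        · simp only [htake, ho, pv_fill_app_O, hlb]
          push_cast; ring
        · simp only [pv_len_setCell, ih2]
        · intro i; simp only [pv_rowlen_setCell, ih3]
        · intro i j
          rw [htake, ho, pv_roll_app_O]
          set M := ((List.range n).foldl (pvInnerStep grid x) (m, -1)).1 with hMdef
          set f := pvFill ((pvCol grid x).take n) with hfdef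
          rw [htn]
          have hxn : x < (M.getD n []).length := by rw [ih3]; exact hrow n (by omega)
          have hxf : x < ((pvSetCell M n x ".").getD f []).length := by
            rw [pv_rowlen_setCell, ih3]; exact hrow f (by omega)
          have hset1 := pv_getCell_setCell M n x "." i j (by omega) hxn
          have hset2 := pv_getCell_setCell (pvSetCell M n x ".") f x "O" i j
            (by rw [pv_len_setCell]; omega) hxf
          rw [hset2, hset1]
          by_cases hjx : j = x
          · subst hjx
            by_cases hif : i = f
            · subst hif
              rw [if_pos ⟨rfl, rfl⟩, if_pos ⟨rfl, by omega⟩,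
                pv_getD_set_self _ _ _ (by simp [hroll_len]; omega)]
              rfl
            · rw [if_neg (by intro h; exact hif h.1)]
              rcases Nat.lt_trichotomy i n with hi | hi | hi
              · rw [if_neg (by intro h; omega), if_pos ⟨rfl, by omega⟩,
                  pv_getD_set_ne _ _ _ _ hif, pv_getD_append _ _ i (by omega)]
                have := ih4 i j
                rw [if_pos ⟨rfl, hi⟩] at this
                exact this
              · rw [if_pos ⟨hi, rfl⟩, if_pos ⟨rfl, by omega⟩,
                  pv_getD_set_ne _ _ _ _ hif, pv_getD_append_at _ _ _ (by omega)]
                rfl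
              · rw [if_neg (by intro h; omega), if_neg (by omega)]
                have := ih4 i j
                rw [if_neg (by omega)] at this
                exact this
          · rw [if_neg (by intro h; exact hjx h.2), if_neg (by intro h; exact hjx h.2),
              if_neg (by intro h; exact hjx h.1)]
            have := ih4 i j
            rw [if_neg (by intro h; exact hjx h.1)] at this
            exact this
      · rw [if_neg ho]
        refine ⟨?_, ih2, ih3, ?_⟩
        · simp only [htake, pv_fill_app_other _ _ hw ho, ih1]
        · intro i j
          rw [htake, pv_roll_app_other _ _ hw ho]
          by_cases hjx : j = x
          · subst hjx
            rcases Nat.lt_trichotomy i n with hi | hi | hi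
            · rw [if_pos ⟨rfl, by omega⟩, pv_getD_append _ _ i (by omega)]
              have := ih4 i j
              rw [if_pos ⟨rfl, hi⟩] at this
              exact this
            · rw [if_pos ⟨rfl, by omega⟩, pv_getD_append_at _ _ _ (by omega)]
              have := ih4 i j
              rw [if_neg (by omega)] at this
              rw [this, hcol i (by omega), hi]
            · rw [if_neg (by omega)]
              have := ih4 i j
              rw [if_neg (by omega)] at this
              exact this
          · rw [if_neg (by intro h; exact hjx h.1)]
            have := ih4 i j
            rw [if_neg (by intro h; exact hjx h.1)] at this
            exact this


theorem pv_core (grid : List String) (x : Nat) (m : List (List String))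
    (hm : m.length = grid.length)
    (hrow : ∀ i, i < m.length → x < (m.getD i []).length)
    (hcol : ∀ i, i < grid.length →
      pvGetCell m i x = String.singleton ((pvCol grid x).getD i ' ')) :
    ((List.range grid.length).foldl (pvInnerStep grid x) (m, -1)).1
      = pvWr x m (PySem.List.enumerate (pvRollColumn (pvCol grid x)) 0) := by
  obtain ⟨-, h2, h3, h4⟩ := pv_inner grid x m hm hrow hcol grid.length (Nat.le_refl _)
  have hglen : (pvCol grid x).length = grid.length := by simp [pvCol]
  have hrlen : (pvRollColumn (pvCol grid x)).length = grid.length := by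
    rw [pv_rollColumn_length, hglen]
  have htake : (pvCol grid x).take grid.length = pvCol grid x := by
    rw [← hglen, List.take_length]
  rw [htake] at h4
  have henum := pv_wr_enum x (pvRollColumn (pvCol grid x)) 0 m (by omega) hrow
  simp only [Nat.cast_zero, Nat.zero_add, Nat.sub_zero, Nat.zero_le, true_and] at henum
  apply pv_matExt
  · rw [h2, pv_wr_len]
  · intro i; rw [h3 i, pv_wr_rowlen]
  · intro i j
    rw [h4 i j, henum i j]
    by_cases hc1 : j = x ∧ i < grid.length
    · rw [if_pos hc1, if_pos ⟨hc1.1, by rw [hrlen]; omega⟩]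
    · rw [if_neg hc1, if_neg (by rintro ⟨a, c⟩; rw [hrlen] at c; exact hc1 ⟨a, by omega⟩)]

theorem pv_outer (grid : List String) : ∀ (xs : List Nat) (m : List (List String)),
    xs.Nodup →
    (∀ x' ∈ xs, ∀ row ∈ grid, x' < row.toList.length) →
    m.length = grid.length →
    (∀ i, (m.getD i []).length = (grid.getD i "").toList.length) →
    (∀ x' ∈ xs, ∀ i, i < grid.length →
      pvGetCell m i x' = String.singleton ((pvCol grid x').getD i ' ')) →
    xs.foldl (fun m x => ((List.range grid.length).foldl (pvInnerStep grid x) (m, -1)).1) m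
      = xs.foldl (fun res x =>
          pvWr x res (PySem.List.enumerate (pvRollColumn (pvCol grid x)) 0)) m := by
  intro xs
  induction xs with
  | nil => intro m _ _ _ _ _; rfl
  | cons x xs ih =>
    intro m hnd hxs hm hrowlen hcol
    simp only [List.foldl_cons]
    have hmem : ∀ i, i < grid.length → grid.getD i "" ∈ grid := by
      intro i hi
      rw [List.getD_eq_getElem?_getD, List.getElem?_eq_getElem hi]
      exact List.getElem_mem _
    have hrow : ∀ i, i < m.length → x < (m.getD i []).length := by
      intro i hi
      rw [hrowlen i]
      exact hxs x (List.mem_cons_self) (grid.getD i "") (hmem i (by omega))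
    rw [pv_core grid x m hm hrow (hcol x List.mem_cons_self)]
    apply ih
    · exact (List.nodup_cons.mp hnd).2
    · intro x' hx'; exact hxs x' (List.mem_cons_of_mem _ hx')
    · rw [pv_wr_len, hm]
    · intro i; rw [pv_wr_rowlen, hrowlen i]
    · intro x' hx' i hi
      have hne : x' ≠ x := by
        intro h; subst h; exact (List.nodup_cons.mp hnd).1 hx'
      rw [pv_wr_ne _ _ _ _ _ hne]
      exact hcol x' (List.mem_cons_of_mem _ hx') i hi

theorem pv_copy0_rowlen (grid : List String) (i : Nat) :
    ((grid.map pvCells).getD i []).length = (grid.getD i "").toList.length := by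
  by_cases hi : i < grid.length
  · simp [List.getD_eq_getElem?_getD, List.getElem?_map, List.getElem?_eq_getElem, hi, pvCells]
  · rw [List.getD_eq_getElem?_getD, List.getD_eq_getElem?_getD,
      List.getElem?_eq_none (by simp; omega), List.getElem?_eq_none (by omega)]
    rfl

theorem pv_copy0_col (grid : List String) (x' i : Nat) (hi : i < grid.length)
    (hx : x' < (grid.getD i "").toList.length) :
    pvGetCell (grid.map pvCells) i x' = String.singleton ((pvCol grid x').getD i ' ') := by
  rw [List.getD_eq_getElem?_getD, List.getElem?_eq_getElem hi] at hx
  simp only [pvGetCell, pvCol, List.getD_eq_getElem?_getD, List.getElem?_map,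
    List.getElem?_eq_getElem, hi]
  simp only [Option.map_some, Option.getD_some, pvCells, List.getD_eq_getElem?_getD,
    List.getElem?_map, PySem.Str.pyGet?_natCast]
  simp only [Option.getD_some] at hx
  rw [List.getElem?_eq_getElem hx]
  simp

theorem roll_boulders_spec : Claim_equal_roll_boulders := by
  intro grid _ hpre
  obtain ⟨hne, hlen⟩ := hpre
  unfold Spec_roll_boulders roll_boulders roll_boulders_alt
  refine pv_outer grid (List.range ((grid.headD "").toList.length)) (grid.map pvCells)
    List.nodup_range ?_ (List.length_map _) (pv_copy0_rowlen grid) ?_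
  · intro x' hx' row hrow
    have h1 := hlen row hrow
    have h2 := List.mem_range.mp hx'
    omega
  · intro x' hx' i hi
    apply pv_copy0_col grid x' i hi
    have h2 := List.mem_range.mp hx'
    have hmem : grid.getD i "" ∈ grid := by
      rw [List.getD_eq_getElem?_getD, List.getElem?_eq_getElem hi]
      exact List.getElem_mem _
    have h1 := hlen _ hmem
    omega
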